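-- pv_equiv track=rewrite | github.com/mmlacak/crochess | py/git_run.py | split_cmd_git_args
-- ===== SOURCE A (Python) =====
-- def split_cmd_git_args(argv):
--     arg_sep_count = 0 # 0 --> script argv, 1 --> git commit argv, 2 --> git push argv
--     git_commit_args = False
--     git_push_args = False
--
--     pre_git_argv = []
--     git_commit_argv = []
--     git_push_argv = []
--
--     for index, arg in enumerate(argv):
--         if arg != '-*-':
--             if index > 0: # index 0 --> arg == '.../crochess/push.py'
--                 a = arg
--
--                 if arg_sep_count == 0:
--                     pre_git_argv.append( a )
--                 elif arg_sep_count == 1: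
--                     git_commit_argv.append( a )
--                 elif arg_sep_count == 2:
--                     git_push_argv.append( a )
--                 else:
--                     raise RuntimeError("Too many arg groups, expected: script.py <args> -*- <git commit args> -*- <git push args>,\nin cmd line: '%s'." % argv)
--         else:
--             arg_sep_count += 1
--
--             if arg_sep_count == 1:
--                 git_commit_args = True
--             elif arg_sep_count == 2:
--                 git_push_args = True
--
--     if git_commit_argv or git_commit_args:
--         # not empty argv, or explicitly to call with no args
--         git_commit_argv = ['git', 'commit'] + git_commit_argv
--
--     if git_push_argv or git_push_args:
--         # not empty argv, or explicitly to call with no args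
--         git_push_argv = ['git', 'push'] + git_push_argv
--
--     return (pre_git_argv, git_commit_argv, git_push_argv)
-- ===== SOURCE B (Python) =====
-- def split_cmd_git_args(argv):
--     groups = [[]]
--     for arg in argv:
--         if arg == '-*-':
--             groups.append([])
--         else:
--             groups[-1].append(arg)
--     if len(groups) > 3:
--         raise RuntimeError("Too many arg groups, expected: script.py <args> -*- <git commit args> -*- <git push args>,\nin cmd line: '%s'." % argv)
--     pre_git_argv = groups[0][1:]  # drop the script name
--     git_commit_argv = ['git', 'commit'] + groups[1] if len(groups) >= 2 else []
--     git_push_argv = ['git', 'push'] + groups[2] if len(groups) >= 3 else []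
--     return (pre_git_argv, git_commit_argv, git_push_argv)
-- ===== Notes on version B (the rewrite author's own statement) =====
-- stated objective: simpler
-- what changed: Replaces the counter-and-flags state machine with a split-on-'-*-'-into-groups pass (script name dropped from the first group afterwards); Pre_ excludes argv with three or more '-*-' separators, where A raises only if a non-separator argument follows the third separator while B's natural group-count check always raises.
-- outside the precondition, e.g. on split_cmd_git_args(['-*-', '-*-', '-*-']): A returns ([], ['git', 'commit'], ['git', 'push']), B raises
import Mathlib
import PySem

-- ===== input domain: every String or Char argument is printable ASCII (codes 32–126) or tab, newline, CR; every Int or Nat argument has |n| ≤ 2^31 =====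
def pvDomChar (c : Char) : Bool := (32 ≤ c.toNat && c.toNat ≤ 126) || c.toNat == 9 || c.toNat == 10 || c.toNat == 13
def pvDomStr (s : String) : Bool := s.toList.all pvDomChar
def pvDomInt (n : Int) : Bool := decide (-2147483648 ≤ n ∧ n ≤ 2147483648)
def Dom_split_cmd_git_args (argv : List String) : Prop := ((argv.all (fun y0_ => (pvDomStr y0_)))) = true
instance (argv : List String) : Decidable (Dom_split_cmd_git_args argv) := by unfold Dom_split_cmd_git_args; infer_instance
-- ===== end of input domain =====

-- B replaces A's counter-and-flags state machine by splitting argv into groups on '-*-' and dropping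
-- the script name from the first group (objective: simpler). Equality of return values is claimed on
-- Pre_ (at most two '-*-' separators), outside which A or B raises RuntimeError.

-- ===== PORT A =====
-- state: (arg_sep_count, git_commit_args, git_push_args, pre_git_argv, git_commit_argv, git_push_argv); none = RuntimeError raised
def pvAStep (st : Option (Nat × Bool × Bool × List String × List String × List String))
    (p : Int × String) : Option (Nat × Bool × Bool × List String × List String × List String) :=
  match st with
  | none => none
  | some (sep, cf, pf, pre, com, push) =>
    if p.2 ≠ "-*-" then
      if p.1 > 0 then
        if sep = 0 then some (sep, cf, pf, pre ++ [p.2], com, push)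
        else if sep = 1 then some (sep, cf, pf, pre, com ++ [p.2], push)
        else if sep = 2 then some (sep, cf, pf, pre, com, push ++ [p.2])
        else none -- raise RuntimeError
      else some (sep, cf, pf, pre, com, push)
    else
      some (sep + 1, (if sep + 1 = 1 then true else cf), (if sep + 1 = 2 then true else pf), pre, com, push)

def split_cmd_git_args (argv : List String) : List String × List String × List String :=
  match (PySem.List.enumerate argv).foldl pvAStep (some (0, false, false, [], [], [])) with
  | none => ([], [], []) -- RuntimeError path; excluded by Pre_
  | some (_, cf, pf, pre, com, push) =>
    (pre,
     (if com ≠ [] ∨ cf = true then ["git", "commit"] ++ com else com),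
     (if push ≠ [] ∨ pf = true then ["git", "push"] ++ push else push))

-- ===== PORT B =====
-- groups[-1].append(arg)
def pvAppendLast : List (List String) → String → List (List String)
  | [], t => [[t]]
  | [g], t => [g ++ [t]]
  | g :: gs, t => g :: pvAppendLast gs t

def pvBStep (gs : List (List String)) (t : String) : List (List String) :=
  if t = "-*-" then gs ++ [[]] else pvAppendLast gs t

def split_cmd_git_args_alt (argv : List String) : List String × List String × List String :=
  let groups := argv.foldl pvBStep [[]]
  if 3 < groups.length then ([], [], []) -- RuntimeError path; excluded by Pre_
  else
    ((groups.headD []).drop 1, -- drop the script name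
     if 2 ≤ groups.length then ["git", "commit"] ++ groups.getD 1 [] else [],
     if 3 ≤ groups.length then ["git", "push"] ++ groups.getD 2 [] else [])

-- ===== PRECONDITION & SPEC =====
-- Pre_ excludes argv with three or more '-*-' separators: B always raises RuntimeError there, while A
-- raises only when a non-separator argument follows the third separator (and returns otherwise).
def Pre_split_cmd_git_args (argv : List String) : Prop := argv.count "-*-" ≤ 2
instance (argv : List String) : Decidable (Pre_split_cmd_git_args argv) := by
  unfold Pre_split_cmd_git_args; infer_instance

def pvWitness_split_cmd_git_args : List String := ["push.py", "v1", "-*-", "-m", "msg", "-*-", "origin"]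

def Spec_split_cmd_git_args (argv : List String) (out : List String × List String × List String) : Prop := out = split_cmd_git_args_alt argv
instance (argv : List String) (out : List String × List String × List String) : Decidable (Spec_split_cmd_git_args argv out) := by unfold Spec_split_cmd_git_args; infer_instance

-- ===== CLAIM (what is proved, stated in full; the proofs are below) =====
def Claim_equal_split_cmd_git_args : Prop := ∀ (argv : List String), Dom_split_cmd_git_args argv → Pre_split_cmd_git_args argv → Spec_split_cmd_git_args argv (split_cmd_git_args argv)

-- ===== LEMMAS AND PROOFS =====

-- A's token list: a leading '-*-' counts as a separator, otherwise index 0 is skipped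
def pvTokens (argv : List String) : List String :=
  if argv.head? = some "-*-" then argv else argv.drop 1

-- A's step, for positions of index > 0 (where the index test always passes)
def pvAStepT (st : Option (Nat × Bool × Bool × List String × List String × List String))
    (t : String) : Option (Nat × Bool × Bool × List String × List String × List String) :=
  pvAStep st (1, t)

lemma pvAStep_pos (st : Option (Nat × Bool × Bool × List String × List String × List String))
    (s : Int) (t : String) (hs : 0 < s) : pvAStep st (s, t) = pvAStepT st t := by
  cases st with
  | none => rfl
  | some v =>
    obtain ⟨sep, cf, pf, pre, com, push⟩ := v
    simp only [pvAStepT, pvAStep]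
    by_cases ht : t = "-*-" <;> simp [ht, hs]

lemma pvFoldA_enum (xs : List String) (s : Int) (hs : 0 < s)
    (st : Option (Nat × Bool × Bool × List String × List String × List String)) :
    (PySem.List.enumerate xs s).foldl pvAStep st = xs.foldl pvAStepT st := by
  induction xs generalizing s st with
  | nil => simp [PySem.List.enumerate_nil]
  | cons x xs ih =>
    rw [PySem.List.enumerate_cons]
    simp only [List.foldl_cons, pvAStep_pos st s x hs]
    exact ih (s + 1) (by omega) _

-- A's fold over enumerate argv equals the index-free fold over the trimmed token list
lemma pvFoldA_tokens (argv : List String) :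
    (PySem.List.enumerate argv).foldl pvAStep (some (0, false, false, [], [], [])) =
    (pvTokens argv).foldl pvAStepT (some (0, false, false, [], [], [])) := by
  cases argv with
  | nil => simp [PySem.List.enumerate_nil, pvTokens]
  | cons a rest =>
    by_cases ha : a = "-*-"
    · subst ha
      rw [PySem.List.enumerate_cons, List.foldl_cons, pvFoldA_enum rest (0 + 1) (by omega)]
      have htok : pvTokens ("-*-" :: rest) = "-*-" :: rest := by simp [pvTokens]
      rw [htok, List.foldl_cons]
      congr 1
    · rw [PySem.List.enumerate_cons, List.foldl_cons, pvFoldA_enum rest (0 + 1) (by omega)]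
      have h0 : pvAStep (some (0, false, false, ([] : List String), ([] : List String), ([] : List String))) ((0 : Int), a)
          = some (0, false, false, [], [], []) := by simp [pvAStep, ha]
      have htok : pvTokens (a :: rest) = rest := by simp [pvTokens, ha]
      rw [h0, htok]

-- B's fold ignores the identity of the first group's existing elements
lemma pvBfold_cons (ts : List String) (x : String) (g : List String) (gs : List (List String)) :
    ts.foldl pvBStep ((x :: g) :: gs) =
      (x :: (ts.foldl pvBStep (g :: gs)).headD []) :: (ts.foldl pvBStep (g :: gs)).tail := by
  induction ts generalizing g gs with
  | nil => simp
  | cons t ts ih =>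
    simp only [List.foldl_cons]
    by_cases ht : t = "-*-"
    · subst ht
      have h1 : pvBStep ((x :: g) :: gs) "-*-" = (x :: g) :: (gs ++ [[]]) := by
        simp [pvBStep]
      have h2 : pvBStep (g :: gs) "-*-" = g :: (gs ++ [[]]) := by simp [pvBStep]
      rw [h1, h2]; exact ih g (gs ++ [[]])
    · cases gs with
      | nil =>
        have h1 : pvBStep [x :: g] t = [x :: (g ++ [t])] := by
          simp [pvBStep, ht, pvAppendLast]
        have h2 : pvBStep [g] t = [g ++ [t]] := by simp [pvBStep, ht, pvAppendLast]
        rw [h1, h2]; exact ih (g ++ [t]) []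
      | cons g2 gs2 =>
        have h1 : pvBStep ((x :: g) :: g2 :: gs2) t = (x :: g) :: pvAppendLast (g2 :: gs2) t := by
          simp [pvBStep, ht, pvAppendLast]
        have h2 : pvBStep (g :: g2 :: gs2) t = g :: pvAppendLast (g2 :: gs2) t := by
          simp [pvBStep, ht, pvAppendLast]
        rw [h1, h2]; exact ih g (pvAppendLast (g2 :: gs2) t)

-- shape of B's group list (after the first group) for a given A-state
def pvGList (sep : Nat) (com push : List String) : List (List String) :=
  if sep = 0 then [] else com :: (if sep = 1 then [] else push :: List.replicate (sep - 2) [])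

lemma pvGList_succ (sep : Nat) (com push : List String)
    (h0 : sep = 0 → com = []) (h1 : sep ≤ 1 → push = []) :
    pvGList (sep + 1) com push = pvGList sep com push ++ [[]] := by
  match sep with
  | 0 => simp [pvGList, h0 rfl]
  | 1 => simp [pvGList, h1 (by omega)]
  | n + 2 =>
    simp only [pvGList, if_neg (by omega : ¬ n + 3 = 0), if_neg (by omega : ¬ n + 3 = 1),
      if_neg (by omega : ¬ n + 2 = 0), if_neg (by omega : ¬ n + 2 = 1)]
    have : n + 3 - 2 = (n + 2 - 2) + 1 := by omega
    rw [this, List.replicate_succ' (n := n + 2 - 2)]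
    simp

lemma pvGList_length (sep : Nat) (com push : List String) :
    (pvGList sep com push).length = sep := by
  match sep with
  | 0 => simp [pvGList]
  | 1 => simp [pvGList]
  | n + 2 =>
    simp only [pvGList, if_neg (by omega : ¬ n + 2 = 0), if_neg (by omega : ¬ n + 2 = 1)]
    simp

-- the joint invariant of A's fold and B's fold over the same token list
def pvRel (ts : List String) : Prop :=
  match ts.foldl pvAStepT (some (0, false, false, [], [], [])) with
  | none => ∃ i, i < ts.length ∧ ts.getD i "" ≠ "-*-" ∧ 3 ≤ (ts.take i).count "-*-"
  | some (sep, cf, pf, pre, com, push) =>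
      cf = decide (1 ≤ sep) ∧ pf = decide (2 ≤ sep) ∧
      (sep = 0 → com = []) ∧ (sep ≤ 1 → push = []) ∧
      sep = ts.count "-*-" ∧
      (ts.head? = some "-*-" → pre = []) ∧
      ts.foldl pvBStep [[]] = pre :: pvGList sep com push

lemma pvHead_count {ts : List String} (h : ts.head? = some "-*-") :
    1 ≤ ts.count "-*-" := by
  cases ts with
  | nil => simp at h
  | cons a rest =>
    simp only [List.head?_cons, Option.some.injEq] at h
    subst h; simp

lemma pvRel_holds (ts : List String) : pvRel ts := by
  induction ts using List.reverseRecOn with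
  | nil => simp [pvRel, pvGList]
  | append_singleton ts t ih =>
    unfold pvRel at ih ⊢
    rw [List.foldl_append, List.foldl_append]
    simp only [List.foldl_cons, List.foldl_nil]
    cases hA : ts.foldl pvAStepT (some (0, false, false, [], [], [])) with
    | none =>
      rw [hA] at ih
      obtain ⟨i, hi, hne, hc⟩ := ih
      simp only [pvAStepT, pvAStep]
      refine ⟨i, by simp; omega, ?_, ?_⟩
      · rwa [List.getD_eq_getElem?_getD, List.getElem?_append_left hi,
          ← List.getD_eq_getElem?_getD]
      · rwa [List.take_append_of_le_length (by omega)]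
    | some v =>
      obtain ⟨sep, cf, pf, pre, com, push⟩ := v
      rw [hA] at ih
      obtain ⟨hcf, hpf, hc0, hp1, hcount, hhd, hB⟩ := ih
      have hhd' : (ts ++ [t]).head? = ts.head?.or (some t) := by
        rw [List.head?_append]; cases ts <;> simp
      by_cases ht : t = "-*-"
      · -- separator: sep increments, B appends a fresh empty group
        subst ht
        have hstep : pvAStepT (some (sep, cf, pf, pre, com, push)) "-*-"
            = some (sep + 1, (if sep + 1 = 1 then true else cf),
                (if sep + 1 = 2 then true else pf), pre, com, push) := by
          simp [pvAStepT, pvAStep]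
        rw [hstep]
        refine ⟨?_, ?_, fun h => absurd h (by omega), fun h => hp1 (by omega), ?_, ?_, ?_⟩
        · by_cases h1 : sep + 1 = 1
          · simp [h1]
          · rw [if_neg h1, hcf]; simp only [decide_eq_decide]; omega
        · by_cases h2 : sep + 1 = 2
          · rw [if_pos h2]; simp; omega
          · rw [if_neg h2, hpf]; simp only [decide_eq_decide]; omega
        · simp [List.count_append, ← hcount]
        · intro h
          rw [hhd'] at h
          cases hts : ts.head? with
          | none =>
            have hts0 : ts = [] := by cases ts <;> simp_all
            subst hts0
            simp only [List.foldl_nil, Option.some.injEq, Prod.mk.injEq] at hA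
            exact hA.2.2.2.1.symm
          | some a =>
            rw [hts] at h
            simp only [Option.some_or, Option.some.injEq] at h
            exact hhd (by rw [hts, h])
        · rw [hB]
          simp only [pvBStep, reduceIte]
          rw [pvGList_succ sep com push hc0 hp1]
          simp
      · -- ordinary token: appended to the current (last) group
        have hcnt : (ts ++ [t]).count "-*-" = ts.count "-*-" := by
          simp [List.count_append, ht]
        have hhdgen : (ts ++ [t]).head? = some "-*-" → ts.head? = some "-*-" := by
          intro h
          rw [hhd'] at h
          cases hts : ts.head? with
          | none =>
            rw [hts] at h; simp at h; exact absurd h ht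
          | some a =>
            rw [hts] at h
            simp only [Option.some_or, Option.some.injEq] at h
            rw [h]
        rcases sep with _ | _ | _ | n
        · have hstep : pvAStepT (some (0, cf, pf, pre, com, push)) t
              = some (0, cf, pf, pre ++ [t], com, push) := by
            simp [pvAStepT, pvAStep, ht]
          rw [hstep]
          refine ⟨hcf, hpf, fun _ => hc0 rfl, fun _ => hp1 (by omega), by omega, ?_, ?_⟩
          · intro h
            have := pvHead_count (hhdgen h)
            omega
          · rw [hB]
            simp [pvBStep, ht, pvAppendLast, pvGList]
        · have hstep : pvAStepT (some (1, cf, pf, pre, com, push)) t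
              = some (1, cf, pf, pre, com ++ [t], push) := by
            simp [pvAStepT, pvAStep, ht]
          rw [hstep]
          refine ⟨hcf, hpf, fun h => absurd h (by omega), fun _ => hp1 (by omega), by omega,
            fun h => hhd (hhdgen h), ?_⟩
          rw [hB]
          simp [pvBStep, ht, pvAppendLast, pvGList]
        · have hstep : pvAStepT (some (2, cf, pf, pre, com, push)) t
              = some (2, cf, pf, pre, com, push ++ [t]) := by
            simp [pvAStepT, pvAStep, ht]
          rw [hstep]
          refine ⟨hcf, hpf, fun h => absurd h (by omega), fun h => absurd h (by omega), by omega,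
            fun h => hhd (hhdgen h), ?_⟩
          rw [hB]
          simp [pvBStep, ht, pvAppendLast, pvGList]
        · -- RuntimeError: non-separator token after ≥ 3 separators
          have hstep : pvAStepT (some (n + 3, cf, pf, pre, com, push)) t = none := by
            simp [pvAStepT, pvAStep, ht]
          rw [hstep]
          refine ⟨ts.length, by simp, ?_, ?_⟩
          · have : (ts ++ [t]).getD ts.length "" = t := by
              rw [List.getD_eq_getElem?_getD, List.getElem?_append_right (le_refl _)]
              simp
            rw [this]; exact ht
          · rw [List.take_left, ← hcount]; omega

lemma pvTokens_count_le (argv : List String) :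
    (pvTokens argv).count "-*-" ≤ argv.count "-*-" := by
  unfold pvTokens
  split
  · exact le_refl _
  · exact List.Sublist.count_le _ (List.drop_sublist 1 argv)

-- ===== VERDICT (by name: the statement is the Claim_ definition above) =====
theorem split_cmd_git_args_spec : Claim_equal_split_cmd_git_args := by
  intro argv _ hpre
  unfold Spec_split_cmd_git_args split_cmd_git_args split_cmd_git_args_alt
  rw [pvFoldA_tokens]
  have hrel := pvRel_holds (pvTokens argv)
  unfold pvRel at hrel
  have hcntle : (pvTokens argv).count "-*-" ≤ 2 :=
    le_trans (pvTokens_count_le argv) hpre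
  cases hA : (pvTokens argv).foldl pvAStepT (some (0, false, false, [], [], [])) with
  | none =>
    rw [hA] at hrel
    obtain ⟨i, hi, hne, hc⟩ := hrel
    have : ((pvTokens argv).take i).count "-*-" ≤ (pvTokens argv).count "-*-" :=
      List.Sublist.count_le _ (List.take_sublist i _)
    omega
  | some v =>
    obtain ⟨sep, cf, pf, pre, com, push⟩ := v
    rw [hA] at hrel
    obtain ⟨hcf, hpf, hc0, hp1, hcount, hhd, hB⟩ := hrel
    have hsep2 : sep ≤ 2 := by omega
    -- B's group list over the full argv
    have hgroups : argv.foldl pvBStep [[]] =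
        ((pvTokens argv).foldl pvBStep [[]]).modifyHead
          (fun g => (if argv.head? = some "-*-" then [] else argv.take 1) ++ g) := by
      cases argv with
      | nil => simp [pvTokens]
      | cons a rest =>
        by_cases ha : a = "-*-"
        · subst ha
          have htok : pvTokens ("-*-" :: rest) = "-*-" :: rest := by simp [pvTokens]
          rw [htok] at hB
          rw [htok, hB]
          simp
        · have htok : pvTokens (a :: rest) = rest := by simp [pvTokens, ha]
          rw [htok] at hB ⊢
          simp only [List.foldl_cons]
          have hstep0 : pvBStep [[]] a = [[a]] := by simp [pvBStep, ha, pvAppendLast]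
          rw [hstep0, pvBfold_cons, hB]
          simp [ha]
    rw [hgroups, hB]
    have hlen : (((pre :: pvGList sep com push).modifyHead
        (fun g => (if argv.head? = some "-*-" then [] else argv.take 1) ++ g)).length)
        = sep + 1 := by
      simp [List.modifyHead, pvGList_length]
    clear hgroups
    by_cases hh : argv.head? = some "-*-"
    · -- leading separator: A's pre is [] too
      have hpe : pre = [] := hhd (by simp [pvTokens, hh])
      subst hpe
      rw [if_pos hh]
      rcases sep with _ | _ | n
      · have h1 : com = [] := hc0 rfl
        have h2 : push = [] := hp1 (by omega)
        subst h1 h2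
        simp [pvGList, hcf, hpf, List.modifyHead]
      · have h2 : push = [] := hp1 (by omega)
        subst h2
        simp [pvGList, hcf, hpf, List.modifyHead]
      · have hn : n = 0 := by omega
        subst hn
        simp [pvGList, hcf, hpf, List.modifyHead]
    · rw [if_neg hh]
      have hdrop : (argv.take 1 ++ pre).drop 1 = pre := by
        cases argv with
        | nil =>
          have hA' := hA
          simp only [pvTokens, List.head?_nil, List.drop_nil, List.foldl_nil,
            Option.some.injEq, Prod.mk.injEq, reduceCtorEq, if_false] at hA'
          simp [← hA'.2.2.2.1]
        | cons a rest => simp [List.take]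
      rcases sep with _ | _ | n
      · have h1 : com = [] := hc0 rfl
        have h2 : push = [] := hp1 (by omega)
        subst h1 h2
        simp [pvGList, hcf, hpf, List.modifyHead, hdrop]
      · have h2 : push = [] := hp1 (by omega)
        subst h2
        simp [pvGList, hcf, hpf, List.modifyHead, hdrop]
      · have hn : n = 0 := by omega
        subst hn
        simp [pvGList, hcf, hpf, List.modifyHead, hdrop]
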